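-- pv_equiv track=rewrite | github.com/flywheel-apps/freesurfer-recon-all | run.py | remove_i_args
-- ===== SOURCE A (Python) =====
-- def remove_i_args(command):
--     """Remove -i <path> arguments from command.
--
--     Args:
--         command (list of str): the command to run recon-all
--
--     Returns:
--         resume_command (list of str): same as command but without -i <arg>
--     """
--
--     resume_command = []
--
--     skip_arg = False
--     for arg in command:
--         if arg == "-i":
--             skip_arg = True  # and don't append
--         elif skip_arg:
--             skip_arg = False  # it is hereby skipped
--         else:
--             resume_command.append(arg)
--
--     return resume_command
-- ===== SOURCE B (Python) =====
-- def remove_i_args(command):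
--     """Remove -i <path> arguments from command (two-pass: removal-index set, then index filter)."""
--     removal = set()
--     for p, arg in enumerate(command):
--         if arg == "-i":
--             removal.add(p)
--             removal.add(p + 1)
--     return [arg for j, arg in enumerate(command) if j not in removal]
-- ===== Notes on version B (the rewrite author's own statement) =====
-- stated objective: alternative
-- what changed: Replaces the single-pass running skip-flag with a two-pass scheme: first build a set of removal indices {p, p+1 for each p with command[p]=='-i'}, then keep exactly the elements whose index is outside that set.
import Mathlib
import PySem

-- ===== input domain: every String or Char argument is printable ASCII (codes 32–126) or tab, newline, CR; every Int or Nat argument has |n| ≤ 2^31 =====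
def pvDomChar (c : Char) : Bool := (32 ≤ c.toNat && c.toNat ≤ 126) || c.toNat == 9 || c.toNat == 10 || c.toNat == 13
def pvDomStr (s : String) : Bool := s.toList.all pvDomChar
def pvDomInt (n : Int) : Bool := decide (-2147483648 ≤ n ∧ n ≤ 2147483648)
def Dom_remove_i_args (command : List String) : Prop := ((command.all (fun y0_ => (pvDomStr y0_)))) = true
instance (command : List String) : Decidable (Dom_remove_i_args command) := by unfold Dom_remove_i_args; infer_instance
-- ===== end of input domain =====

-- B replaces A's single-pass running skip-flag with a two-pass removal-index set (alternative decomposition, same cost).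

-- ===== PORT A =====
-- single pass with a running skip_arg flag
def remove_i_args (command : List String) : List String :=
  (command.foldl
    (fun (st : List String × Bool) arg =>
      if arg = "-i" then (st.1, true)
      else if st.2 then (st.1, false)
      else (st.1 ++ [arg], st.2)) ([], false)).1

-- ===== PORT B =====
-- pass 1: collect removal indices {p, p+1 : command[p] == "-i"}; pass 2: keep elements whose index is outside
def remove_i_args_alt (command : List String) : List String :=
  let removal : PySem.Set Int :=
    (PySem.List.enumerate command).foldl
      (fun s pa => if pa.2 = "-i" then (s.add pa.1).add (pa.1 + 1) else s)
      PySem.Set.empty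
  (PySem.List.enumerate command).foldl
    (fun acc pa => if removal.contains pa.1 then acc else acc ++ [pa.2]) []

-- ===== PRECONDITION & SPEC =====
def Spec_remove_i_args (command : List String) (out : List String) : Prop := out = remove_i_args_alt command
instance (command : List String) (out : List String) : Decidable (Spec_remove_i_args command out) := by unfold Spec_remove_i_args; infer_instance

-- ===== CLAIM (what is proved, stated in full; the proofs are below) =====
def Claim_equal_remove_i_args : Prop := ∀ (command : List String), Dom_remove_i_args command → Spec_remove_i_args command (remove_i_args command)

-- ===== LEMMAS AND PROOFS =====

-- common recursive description of the result: `skip` = previous element was "-i"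
def pvGo (skip : Bool) : List String → List String
  | [] => []
  | a :: l => if a = "-i" then pvGo true l else if skip then pvGo false l else a :: pvGo false l

theorem pvFilter_go (l : List String) (s : Int) (R : Int → Bool) (prev : Bool) (acc : List String)
    (h : ∀ k : Nat, R (s + k) = true ↔
      (l[k]? = some "-i" ∨ (k = 0 ∧ prev = true) ∨ ∃ q : Nat, k = q + 1 ∧ l[q]? = some "-i")) :
    (PySem.List.enumerate l s).foldl
      (fun acc (pa : Int × String) => if R pa.1 then acc else acc ++ [pa.2]) acc
    = acc ++ pvGo prev l := by
  induction l generalizing s prev acc with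
  | nil => simp [PySem.List.enumerate, pvGo]
  | cons a l ih =>
    rw [PySem.List.enumerate_cons, List.foldl_cons]
    have hs : R s = true ↔ (a = "-i" ∨ prev = true) := by
      have h0 := h 0
      simpa using h0
    have hrec : ∀ k : Nat, R (s + 1 + k) = true ↔
        (l[k]? = some "-i" ∨ (k = 0 ∧ (decide (a = "-i")) = true) ∨
          ∃ q : Nat, k = q + 1 ∧ l[q]? = some "-i") := by
      intro k
      have harith : s + 1 + (k : Int) = s + ((k + 1 : Nat) : Int) := by push_cast; ring
      rw [harith, h (k + 1)]
      cases k with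
      | zero => simp
      | succ r => simp
    by_cases ha : a = "-i"
    · have hR : R s = true := hs.mpr (Or.inl ha)
      rw [if_pos hR]
      have := ih (s + 1) (decide (a = "-i")) acc hrec
      simpa [pvGo, ha] using this
    · by_cases hp : prev = true
      · have hR : R s = true := hs.mpr (Or.inr hp)
        rw [if_pos hR]
        have := ih (s + 1) (decide (a = "-i")) acc hrec
        simpa [pvGo, ha, hp] using this
      · have hR : ¬ R s = true := by
          rw [hs]; push Not; exact ⟨ha, hp⟩
        rw [if_neg hR]
        have := ih (s + 1) (decide (a = "-i")) (acc ++ [a]) hrec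
        simp only [Bool.not_eq_true] at hp
        simpa [pvGo, ha, hp] using this

theorem pvBuild_mem (l : List String) (s : Int) (s0 : PySem.Set Int) (j : Int) :
    (j ∈ (PySem.List.enumerate l s).foldl
        (fun st (pa : Int × String) => if pa.2 = "-i" then (st.add pa.1).add (pa.1 + 1) else st) s0)
    ↔ j ∈ s0 ∨ ∃ p : Nat, l[p]? = some "-i" ∧ (j = s + p ∨ j = s + p + 1) := by
  induction l generalizing s s0 with
  | nil => simp [PySem.List.enumerate]
  | cons a l ih =>
    rw [PySem.List.enumerate_cons]
    by_cases ha : a = "-i"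
    · simp only [List.foldl_cons, ha, reduceIte]
      rw [ih]
      simp only [PySem.Set.mem_add]
      constructor
      · rintro (((h | h) | h) | ⟨p, hp, hj⟩)
        · exact Or.inl h
        · exact Or.inr ⟨0, by simp, by simp [h]⟩
        · exact Or.inr ⟨0, by simp, by right; simpa using h⟩
        · refine Or.inr ⟨p + 1, by simpa using hp, ?_⟩
          rcases hj with hj | hj
          · left; push_cast; omega
          · right; push_cast; omega
      · rintro (h | ⟨p, hp, hj⟩)
        · exact Or.inl (Or.inl (Or.inl h))
        · cases p with
          | zero =>
            rcases hj with hj | hj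
            · exact Or.inl (Or.inl (Or.inr (by simpa using hj)))
            · exact Or.inl (Or.inr (by simpa using hj))
          | succ q =>
            refine Or.inr ⟨q, by simpa using hp, ?_⟩
            rcases hj with hj | hj
            · left; push_cast at hj ⊢; omega
            · right; push_cast at hj ⊢; omega
    · simp only [List.foldl_cons, if_neg ha]
      rw [ih]
      constructor
      · rintro (h | ⟨p, hp, hj⟩)
        · exact Or.inl h
        · refine Or.inr ⟨p + 1, by simpa using hp, ?_⟩
          rcases hj with hj | hj
          · left; push_cast at hj ⊢; omega
          · right; push_cast at hj ⊢; omega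
      · rintro (h | ⟨p, hp, hj⟩)
        · exact Or.inl h
        · cases p with
          | zero => simp at hp; exact absurd hp ha
          | succ q =>
            refine Or.inr ⟨q, by simpa using hp, ?_⟩
            rcases hj with hj | hj
            · left; push_cast at hj ⊢; omega
            · right; push_cast at hj ⊢; omega

theorem pvA_fold (l : List String) (acc : List String) (skip : Bool) :
    (l.foldl
      (fun (st : List String × Bool) arg =>
        if arg = "-i" then (st.1, true)
        else if st.2 then (st.1, false)
        else (st.1 ++ [arg], st.2)) (acc, skip)).1 = acc ++ pvGo skip l := by
  induction l generalizing acc skip with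
  | nil => simp [pvGo]
  | cons a l ih =>
    by_cases ha : a = "-i" <;> cases skip <;>
      simp [pvGo, ha, List.foldl_cons, ih]

theorem pvB_eq_go (command : List String) : remove_i_args_alt command = pvGo false command := by
  unfold remove_i_args_alt
  apply pvFilter_go command 0 _ false []
  intro k
  rw [PySem.Set.contains_iff, pvBuild_mem]
  simp only [PySem.Set.empty]
  constructor
  · rintro (h | ⟨p, hp, hj⟩)
    · simp at h
    · rcases hj with hj | hj
      · have hkp : k = p := by exact_mod_cast by omega
        subst hkp; exact Or.inl hp
      · have hkp : k = p + 1 := by exact_mod_cast by omega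
        exact Or.inr (Or.inr ⟨p, hkp, hp⟩)
  · rintro (h | ⟨_, hf⟩ | ⟨q, hq, hl⟩)
    · exact Or.inr ⟨k, h, Or.inl (by ring)⟩
    · simp at hf
    · exact Or.inr ⟨q, hl, Or.inr (by subst hq; push_cast; ring)⟩

-- ===== VERDICT (by name: the statement is the Claim_ definition above) =====
theorem remove_i_args_spec : Claim_equal_remove_i_args := by
  intro command _
  unfold Spec_remove_i_args
  rw [pvB_eq_go]
  unfold remove_i_args
  simpa using pvA_fold command [] false
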